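-- pv_equiv track=rewrite | github.com/anonymousgitgit/SubmissionAAAI2023 | data/gp_cpp_loader.py | group_by_size
-- ===== SOURCE A (Python) =====
-- from collections import defaultdict
--
-- def group_by_size(tree_data):
--     buckets = defaultdict(list)
--     for tree in tree_data:
--         size = tree['size']
--         if size < 10:
--             buckets[size].append(tree)
--         else:
--             idx = (size // 5) * 5
--             buckets[idx].append(tree)
--     return dict(buckets)
-- ===== SOURCE B (Python) =====
-- def group_by_size(tree_data):
--     def key(t):
--         s = t['size']
--         return s if s < 10 else (s // 5) * 5
--     ks = list(dict.fromkeys(map(key, tree_data)))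
--     return {k: [t for t in tree_data if key(t) == k] for k in ks}
-- ===== Notes on version B (the rewrite author's own statement) =====
-- stated objective: alternative
-- what changed: Replaces the single-pass defaultdict bucketing with a two-phase scheme: compute the ordered-deduplicated list of bucket keys once (dict.fromkeys), then build each bucket by filtering the whole list per key.
import Mathlib
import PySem

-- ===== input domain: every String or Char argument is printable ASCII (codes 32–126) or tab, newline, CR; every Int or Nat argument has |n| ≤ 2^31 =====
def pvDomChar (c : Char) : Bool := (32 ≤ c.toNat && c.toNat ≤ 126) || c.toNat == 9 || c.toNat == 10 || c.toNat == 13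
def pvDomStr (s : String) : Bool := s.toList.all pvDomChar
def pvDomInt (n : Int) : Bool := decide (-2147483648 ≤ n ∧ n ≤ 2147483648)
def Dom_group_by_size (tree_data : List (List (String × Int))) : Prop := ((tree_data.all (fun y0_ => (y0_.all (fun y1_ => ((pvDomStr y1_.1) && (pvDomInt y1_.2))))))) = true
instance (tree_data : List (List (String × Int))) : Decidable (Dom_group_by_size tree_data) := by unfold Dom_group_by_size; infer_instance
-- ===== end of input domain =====

-- B changes the algorithm (ordered-dedup of bucket keys, then one filter per key) at the same observable
-- behaviour; equivalence is about the returned dict (as an insertion-ordered association list).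

-- ===== PORT A =====
-- tree['size']: first-match association-list lookup (dict convention); total form, valid under Pre_.
def pvSizeA (tree : List (String × Int)) : Int :=
  ((tree.find? (fun p => p.1 == "size")).map (·.2)).getD 0

def group_by_size (tree_data : List (List (String × Int))) : List (Int × List (List (String × Int))) :=
  (tree_data.foldl
    (fun (buckets : PySem.Dict Int (List (List (String × Int)))) tree =>
      let size := pvSizeA tree
      if size < 10 then
        buckets.modify size [] (· ++ [tree])
      else
        let idx := (PySem.Int.floordiv size 5) * 5
        buckets.modify idx [] (· ++ [tree]))
    PySem.Dict.empty).items

-- ===== PORT B =====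
def pvKeyB (tree : List (String × Int)) : Int :=
  let s := ((tree.find? (fun p => p.1 == "size")).map (·.2)).getD 0
  if s < 10 then s else (PySem.Int.floordiv s 5) * 5

def group_by_size_alt (tree_data : List (List (String × Int))) : List (Int × List (List (String × Int))) :=
  let ks := PySem.List.dedup (tree_data.map pvKeyB)
  ks.map (fun k => (k, tree_data.filter (fun t => pvKeyB t == k)))

-- ===== PRECONDITION & SPEC =====
-- Pre_: every tree carries a 'size' key; on a tree without it Python's tree['size'] raises KeyError.
def Pre_group_by_size (tree_data : List (List (String × Int))) : Prop :=
  (tree_data.all (fun t => t.any (fun p => p.1 == "size"))) = true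
instance (tree_data : List (List (String × Int))) : Decidable (Pre_group_by_size tree_data) := by unfold Pre_group_by_size; infer_instance
def pvWitness_group_by_size : (List (List (String × Int))) := [[("size", 3)], [("size", 17)]]

def Spec_group_by_size (tree_data : List (List (String × Int))) (out : List (Int × List (List (String × Int)))) : Prop := out = group_by_size_alt tree_data
instance (tree_data : List (List (String × Int))) (out : List (Int × List (List (String × Int)))) : Decidable (Spec_group_by_size tree_data out) := by unfold Spec_group_by_size; infer_instance

-- ===== CLAIM (what is proved, stated in full; the proofs are below) =====
def Claim_equal_group_by_size : Prop := ∀ (tree_data : List (List (String × Int))), Dom_group_by_size tree_data → Pre_group_by_size tree_data → Spec_group_by_size tree_data (group_by_size tree_data)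

-- ===== LEMMAS AND PROOFS =====

-- A's loop body is one modify at the bucket key pvKeyB.
theorem stepA_eq (buckets : PySem.Dict Int (List (List (String × Int)))) (tree : List (String × Int)) :
    (let size := pvSizeA tree
     if size < 10 then buckets.modify size [] (· ++ [tree])
     else
       let idx := (PySem.Int.floordiv size 5) * 5
       buckets.modify idx [] (· ++ [tree]))
    = buckets.modify (pvKeyB tree) [] (· ++ [tree]) := by
  simp only [pvSizeA, pvKeyB]
  split_ifs <;> rfl

theorem fold_eq (tree_data : List (List (String × Int))) :
    tree_data.foldl
      (fun (buckets : PySem.Dict Int (List (List (String × Int)))) tree =>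
        let size := pvSizeA tree
        if size < 10 then buckets.modify size [] (· ++ [tree])
        else
          let idx := (PySem.Int.floordiv size 5) * 5
          buckets.modify idx [] (· ++ [tree]))
      PySem.Dict.empty
    = (tree_data.map (fun t => (pvKeyB t, t))).foldl
        (fun d p => d.modify p.1 [] (fun x => x ++ [p.2])) PySem.Dict.empty := by
  rw [List.foldl_map]
  exact PySem.List.foldl_congr_mem _ _ _ _ (fun d t _ => stepA_eq d t)

theorem main_eq (tree_data : List (List (String × Int))) :
    group_by_size tree_data = group_by_size_alt tree_data := by
  unfold group_by_size group_by_size_alt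
  rw [fold_eq]
  set l := tree_data.map (fun t => (pvKeyB t, t)) with hl
  have hnd : ((l.foldl (fun d p => d.modify p.1 [] (fun x => x ++ [p.2])) PySem.Dict.empty).keys).Nodup :=
    PySem.Dict.nodup_keys_foldl_modify_key l (fun p => p.1) []
      (fun _ p v => v ++ [p.2]) PySem.Dict.empty (by simp)
  rw [PySem.Dict.items_eq_map_keys _ hnd []]
  have hkeys : (l.foldl (fun d p => d.modify p.1 [] (fun x => x ++ [p.2])) PySem.Dict.empty).keys
      = PySem.List.dedup (tree_data.map pvKeyB) := by
    rw [PySem.Dict.keys_foldl_modify_key l (fun p => p.1) []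
      (fun _ p v => v ++ [p.2]) PySem.Dict.empty]
    rw [hl, List.map_map]
    simp [PySem.Set.update, PySem.Set.ofList_eq_foldl, Function.comp_def]
  rw [hkeys]
  apply List.map_congr_left
  intro k _
  rw [PySem.Dict.getD_foldl_modify_append l PySem.Dict.empty k, PySem.Dict.getD_empty]
  simp [hl, List.filter_map, Function.comp_def]

-- ===== VERDICT (by name: the statement is the Claim_ definition above) =====
theorem group_by_size_spec : Claim_equal_group_by_size := by
  intro tree_data _ _
  exact main_eq tree_data
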